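-- pv_equiv track=rewrite | github.com/bharath539/pdf-forge | backend/app/services/format_learner.py | _cluster_x_positions
-- ===== SOURCE A (Python) =====
-- from collections import Counter, defaultdict
--
-- def _cluster_x_positions(
--     counter: Counter[int], tolerance: int = 8
-- ) -> list[int]:
--     """Cluster nearby x positions and return the representative value for each cluster."""
--     if not counter:
--         return []
--
--     positions = sorted(counter.keys())
--     clusters: list[list[int]] = [[positions[0]]]
--
--     for pos in positions[1:]:
--         if pos - clusters[-1][-1] <= tolerance:
--             clusters[-1].append(pos)
--         else:
--             clusters.append([pos])
--
--     # Return the most common position in each cluster (weighted by count)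
--     result: list[int] = []
--     for cluster in clusters:
--         # Weight by frequency
--         best = max(cluster, key=lambda p: counter[p])
--         total_count = sum(counter[p] for p in cluster)
--         # Only keep clusters with enough occurrences (at least 3 rows)
--         if total_count >= 3:
--             result.append(best)
--
--     return result
-- ===== SOURCE B (Python) =====
-- def _cluster_x_positions(counter, tolerance=8):
--     """Single streaming pass over the sorted positions: no cluster lists are built."""
--     if not counter:
--         return []
--     result = []
--     it = iter(sorted(counter.keys()))
--     first = next(it)
--     prev = best = first
--     best_count = total = counter[first]
--     for pos in it:
--         c = counter[pos]
--         if pos - prev <= tolerance: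
--             if c > best_count:
--                 best, best_count = pos, c
--             total += c
--         else:
--             if total >= 3:
--                 result.append(best)
--             best, best_count, total = pos, c, c
--         prev = pos
--     if total >= 3:
--         result.append(best)
--     return result
-- ===== Notes on version B (the rewrite author's own statement) =====
-- stated objective: alternative
-- what changed: Replaces building an explicit list of cluster lists and then reducing each with max()/sum() by a single streaming pass over the sorted keys that keeps only running prev/best/best_count/total aggregates and flushes on each gap.
import Mathlib
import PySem

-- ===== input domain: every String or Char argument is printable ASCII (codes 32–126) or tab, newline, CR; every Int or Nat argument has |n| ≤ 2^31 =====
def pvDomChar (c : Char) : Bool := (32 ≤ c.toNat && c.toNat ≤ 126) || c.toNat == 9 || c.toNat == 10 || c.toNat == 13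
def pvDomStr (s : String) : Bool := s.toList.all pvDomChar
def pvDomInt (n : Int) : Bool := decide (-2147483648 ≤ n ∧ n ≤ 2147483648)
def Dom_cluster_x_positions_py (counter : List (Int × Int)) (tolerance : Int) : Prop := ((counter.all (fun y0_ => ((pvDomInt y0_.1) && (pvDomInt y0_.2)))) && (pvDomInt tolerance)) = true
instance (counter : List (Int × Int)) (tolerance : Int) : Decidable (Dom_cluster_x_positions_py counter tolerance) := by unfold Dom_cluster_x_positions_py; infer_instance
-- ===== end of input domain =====

-- B replaces A's build-clusters-then-reduce with one streaming pass over the sorted keys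
-- (running best/best_count/total, flush on gap) — alternative decomposition, no cluster lists.


-- ===== PORT A =====
-- clusters are kept reversed (outer list reversed, each cluster reversed, so the head is
-- the last-appended element = Python's clusters[-1][-1]); reversed back before reducing.
def pvStepA (tol : Int) (acc : List (List Int)) (pos : Int) : List (List Int) :=
  match acc with
  | (last :: cs) =>
    match last with
    | (l :: ltl) => if pos - l ≤ tol then (pos :: l :: ltl) :: cs else [pos] :: (l :: ltl) :: cs
    | [] => [pos] :: cs      -- unreachable: clusters are never empty
  | [] => [[pos]]            -- unreachable: acc starts nonempty

-- the second Python loop: best = max(cluster, key=counter.get), total = sum, keep if total >= 3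
def pvReduce (d : PySem.Dict Int Int) (clusters : List (List Int)) : List Int :=
  clusters.foldl (fun res cluster =>
    match PySem.List.max? cluster (fun p => d.getD p 0) with
    | some best =>
      let total := cluster.foldl (fun s p => s + d.getD p 0) 0
      if total ≥ 3 then res ++ [best] else res
    | none => res) []        -- none unreachable: clusters are nonempty

def cluster_x_positions_py (counter : List (Int × Int)) (tolerance : Int) : List Int :=
  let d := PySem.Dict.ofList counter
  if d.keys = [] then []
  else
    match PySem.List.sorted d.keys (fun x => x) false with
    | [] => []               -- unreachable: keys nonempty
    | p0 :: rest =>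
      pvReduce d (((rest.foldl (pvStepA tolerance) [[p0]]).reverse).map List.reverse)

-- ===== PORT B =====
-- state = (prev, best, best_count, total, result)
def pvStepB (d : PySem.Dict Int Int) (tol : Int)
    (st : Int × Int × Int × Int × List Int) (pos : Int) : Int × Int × Int × Int × List Int :=
  let (prev, best, bestCnt, total, res) := st
  let c := d.getD pos 0
  if pos - prev ≤ tol then
    if c > bestCnt then (pos, pos, c, total + c, res)
    else (pos, best, bestCnt, total + c, res)
  else
    (pos, pos, c, c, if total ≥ 3 then res ++ [best] else res)

-- the final flush after the loop
def pvFinish (st : Int × Int × Int × Int × List Int) : List Int :=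
  let (_, best, _, total, res) := st
  if total ≥ 3 then res ++ [best] else res

def cluster_x_positions_py_alt (counter : List (Int × Int)) (tolerance : Int) : List Int :=
  let d := PySem.Dict.ofList counter
  match PySem.List.sorted d.keys (fun x => x) false with
  | [] => []
  | p0 :: rest =>
    let c0 := d.getD p0 0
    pvFinish (rest.foldl (pvStepB d tolerance) (p0, p0, c0, c0, []))

-- ===== PRECONDITION & SPEC =====
def Spec_cluster_x_positions_py (counter : List (Int × Int)) (tolerance : Int) (out : List Int) : Prop := out = cluster_x_positions_py_alt counter tolerance
instance (counter : List (Int × Int)) (tolerance : Int) (out : List Int) : Decidable (Spec_cluster_x_positions_py counter tolerance out) := by unfold Spec_cluster_x_positions_py; infer_instance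

-- ===== CLAIM (what is proved, stated in full; the proofs are below) =====
def Claim_equal_cluster_x_positions_py : Prop := ∀ (counter : List (Int × Int)) (tolerance : Int), Dom_cluster_x_positions_py counter tolerance → Spec_cluster_x_positions_py counter tolerance (cluster_x_positions_py counter tolerance)

-- ===== LEMMAS AND PROOFS =====

-- the reduce loop only appends: pull the accumulator out front
theorem pvReduce_acc (d : PySem.Dict Int Int) :
    ∀ (clusters : List (List Int)) (res : List Int),
    clusters.foldl (fun res cluster =>
      match PySem.List.max? cluster (fun p => d.getD p 0) with
      | some best =>
        let total := cluster.foldl (fun s p => s + d.getD p 0) 0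
        if total ≥ 3 then res ++ [best] else res
      | none => res) res = res ++ pvReduce d clusters := by
  intro clusters
  induction clusters with
  | nil => intro res; simp [pvReduce]
  | cons c cs ih =>
    intro res
    simp only [pvReduce, List.foldl_cons] at *
    cases h : PySem.List.max? c (fun p => d.getD p 0) with
    | none =>
      exact ih res
    | some best =>
      by_cases ht : c.foldl (fun s p => s + d.getD p 0) 0 ≥ 3
      · simp only [ht, if_pos]
        rw [ih (res ++ [best]), ih ([] ++ [best])]
        simp
      · simp only [ht, if_neg, not_false_iff]
        exact ih res

-- finished clusters ride along untouched under pvStepA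
theorem pvStepA_split (tol : Int) :
    ∀ (rest : List Int) (x : Int) (l : List Int) (cs : List (List Int)),
    rest.foldl (pvStepA tol) ((x :: l) :: cs) = rest.foldl (pvStepA tol) [x :: l] ++ cs := by
  intro rest
  induction rest with
  | nil => intro x l cs; simp
  | cons pos rest ih =>
    intro x l cs
    simp only [List.foldl_cons, pvStepA]
    by_cases h : pos - x ≤ tol
    · simp only [h, if_pos]
      exact ih (pos) (x :: l) cs
    · simp only [h, if_neg, not_false_iff]
      rw [ih pos [] ((x :: l) :: cs), ih pos [] [x :: l]]
      simp

-- the streaming pass equals build-clusters-then-reduce, given the running aggregates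
-- describe the (reversed) current cluster x :: l
theorem pvMain (d : PySem.Dict Int Int) (tol : Int) :
    ∀ (rest : List Int) (x : Int) (l : List Int) (best total : Int) (res : List Int),
    PySem.List.max? (x :: l).reverse (fun p => d.getD p 0) = some best →
    (x :: l).reverse.foldl (fun s p => s + d.getD p 0) 0 = total →
    pvFinish (rest.foldl (pvStepB d tol) (x, best, d.getD best 0, total, res))
      = res ++ pvReduce d (((rest.foldl (pvStepA tol) [x :: l]).reverse).map List.reverse) := by
  intro rest
  induction rest with
  | nil =>
    intro x l best total res hmax hsum
    rw [List.reverse_cons] at hmax hsum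
    simp only [List.foldl_nil, pvFinish, pvReduce, List.reverse_cons, List.reverse_nil,
      List.nil_append, List.map_cons, List.map_nil, List.foldl_cons, List.foldl_nil,
      hmax, hsum]
    by_cases ht : total ≥ 3 <;> simp [ht]
  | cons pos rest ih =>
    intro x l best total res hmax hsum
    simp only [List.foldl_cons, pvStepB, pvStepA]
    by_cases hnear : pos - x ≤ tol
    · simp only [hnear, if_pos]
      have hmax' : PySem.List.max? (pos :: x :: l).reverse (fun p => d.getD p 0)
          = if d.getD best 0 < d.getD pos 0 then some pos else some best := by
        have : (pos :: x :: l).reverse = (x :: l).reverse ++ [pos] := by simp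
        rw [this]
        simp only [PySem.List.max?, List.foldl_append, List.foldl_cons, List.foldl_nil] at hmax ⊢
        rw [hmax]
      have hsum' : (pos :: x :: l).reverse.foldl (fun s p => s + d.getD p 0) 0
          = total + d.getD pos 0 := by
        have : (pos :: x :: l).reverse = (x :: l).reverse ++ [pos] := by simp
        rw [this, List.foldl_append, hsum]
        rfl
      by_cases hbig : d.getD pos 0 > d.getD best 0
      · simp only [hbig, if_pos]
        have := ih pos (x :: l) pos (total + d.getD pos 0) res
          (by rw [hmax']; simp [show d.getD best 0 < d.getD pos 0 from hbig]) hsum'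
        exact this
      · simp only [hbig, if_neg, not_false_iff]
        have := ih pos (x :: l) best (total + d.getD pos 0) res
          (by rw [hmax']; simp [show ¬ d.getD best 0 < d.getD pos 0 from hbig]) hsum'
        exact this
    · simp only [hnear, if_neg, not_false_iff]
      rw [pvStepA_split tol rest pos [] [x :: l]]
      rw [ih pos [] pos (d.getD pos 0) (if total ≥ 3 then res ++ [best] else res)
        (by simp [PySem.List.max?]) (by simp)]
      have hrev : (rest.foldl (pvStepA tol) [[pos]] ++ [x :: l]).reverse.map List.reverse
          = (x :: l).reverse :: ((rest.foldl (pvStepA tol) [[pos]]).reverse.map List.reverse) := by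
        simp
      rw [hrev]
      have hred : pvReduce d ((x :: l).reverse
            :: ((rest.foldl (pvStepA tol) [[pos]]).reverse.map List.reverse))
          = (if total ≥ 3 then [best] else [])
            ++ pvReduce d ((rest.foldl (pvStepA tol) [[pos]]).reverse.map List.reverse) := by
        simp only [pvReduce, List.foldl_cons]
        rw [pvReduce_acc, hmax, hsum]
        by_cases ht : total ≥ 3 <;> simp [ht, pvReduce]
      rw [hred]
      by_cases ht : total ≥ 3 <;> simp [ht]

-- ===== VERDICT (by name: the statement is the Claim_ definition above) =====
theorem cluster_x_positions_py_spec : Claim_equal_cluster_x_positions_py := by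
  intro counter tolerance _
  unfold Spec_cluster_x_positions_py cluster_x_positions_py cluster_x_positions_py_alt
  dsimp only
  by_cases hk : (PySem.Dict.ofList counter).keys = []
  · rw [hk]; rfl
  · simp only [hk, if_neg, not_false_iff]
    cases hs : PySem.List.sorted (PySem.Dict.ofList counter).keys (fun x => x) false with
    | nil => exact absurd ((PySem.List.sorted_eq_nil_iff _ _ _).mp hs) hk
    | cons p0 rest =>
      have := pvMain (PySem.Dict.ofList counter) tolerance rest p0 [] p0
        ((PySem.Dict.ofList counter).getD p0 0) []
        (by simp [PySem.List.max?]) (by simp)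
      simp only [List.nil_append] at this
      exact this.symm
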